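-- pv_equiv track=rewrite | github.com/peoplenarthax/code-challenges | hackerrank/arrays/array_manipulation.py | slow_arrayManipulation
-- ===== SOURCE A (Python) =====
-- def slow_arrayManipulation(n, queries):
--     intervals = [[1,n,0]]
--     for query in queries:
--         # low = query[0]
--         # high = query[1]
--         new_intervals = []
--         for interval in intervals:
--             # Cut out of the current interval
--             if (query[0] < interval[0] and query[1] < interval[0]) or (query[0] > interval[1] and query[1] > interval[1]):
--                 new_intervals.append(interval)
--                 continue
--             # Cut within an interval
--             if interval[0] <= query[0] and interval[1] >= query[1]:
--                 if (interval[0] == query[0]):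
--                     new_intervals.append([interval[0], query[1], interval[2] + query[2]])
--                     new_intervals.append([query[1] + 1, interval[1], interval[2]])
--                     continue
--                 if (interval[1] == query[1]):
--                     new_intervals.append([interval[0], query[0], interval[2]])
--                     new_intervals.append([query[0] +1 , interval[1], interval[2] + query[2]])
--                     continue
--                 new_intervals.append([interval[0], query[0] - 1, interval[2]])
--                 new_intervals.append([query[0], query[1], interval[2] + query[2]])
--                 new_intervals.append([query[1] +1 , interval[1], interval[2] + query[2]])
--                 continue
--             # Cut covers the interval
--             if interval[0] > query[0] and interval[1] < query[1]:
--                 new_intervals.append([interval[0], interval[1], interval[2] + query[2]])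
--                 if (interval[1] == query[1]):
--                     continue
--             # Low limit in interval, high out
--             if interval[0] < query[0] <= interval[1] and query[1] > interval[1]:
--                 new_intervals.append([interval[0], query[0] - 1, interval[2]])
--                 new_intervals.append([query[0], interval[1], interval[2] + query[2]])
--                 continue
--
--             # High limit inside interval
--             if interval[1] > query[1] > interval[0]:
--                 new_intervals.append([interval[0], query[1], interval[2] + query[2]])
--                 new_intervals.append([query[1] + 1, interval[1], interval[2]])
--                 continue
--         intervals = new_intervals
--
--     return max(intervals, key=lambda i: i[2])[2]
-- ===== SOURCE B (Python) =====
-- # Depth-first replay of the interval-splitting rules with an explicit stack: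
-- # each interval is threaded through all remaining queries at once, so the
-- # per-query interval lists are never materialised; the surviving leaf values
-- # are collected and the answer is their maximum.
-- def slow_arrayManipulation(n, queries):
--     def split(lo, hi, v, a, b, k):
--         # the rewriting rules for one interval against one range update
--         if (a < lo and b < lo) or (a > hi and b > hi):
--             return [(lo, hi, v)]
--         if lo <= a and b <= hi:
--             if lo == a:
--                 return [(lo, b, v + k), (b + 1, hi, v)]
--             if hi == b:
--                 return [(lo, a, v), (a + 1, hi, v + k)]
--             return [(lo, a - 1, v), (a, b, v + k), (b + 1, hi, v + k)]
--         out = [(lo, hi, v + k)] if a < lo and hi < b else []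
--         if lo < a <= hi and hi < b:
--             return out + [(lo, a - 1, v), (a, hi, v + k)]
--         if lo < b < hi:
--             return out + [(lo, b, v + k), (b + 1, hi, v)]
--         return out
--
--     m = len(queries)
--     leaves = []
--     stack = [(1, n, 0, 0)]
--     while stack:
--         lo, hi, v, i = stack.pop()
--         if i == m:
--             leaves.append(v)
--         else:
--             q = queries[i]
--             stack.extend((l2, h2, v2, i + 1)
--                          for (l2, h2, v2) in split(lo, hi, v, q[0], q[1], q[2]))
--     return max(leaves)
-- ===== Notes on version B (the rewrite author's own statement) =====
-- stated objective: alternative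
-- what changed: A rebuilds the whole interval list once per query (staged breadth-first passes with appends and a keyed max); B instead runs a depth-first traversal with an explicit stack, threading each interval through all remaining queries at once, so no per-query interval list is ever materialised and leaf values are emitted in a different (reverse) order, proven irrelevant for the maximum. Pre_ excludes queries with fewer than three entries, where A can accidentally return (never touching query[2]) while B, which reads all three fields up front, raises IndexError.
-- outside the precondition, e.g. on slow_arrayManipulation(3, [[5, 6]]): A returns 0, B raises IndexError
import Mathlib
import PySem

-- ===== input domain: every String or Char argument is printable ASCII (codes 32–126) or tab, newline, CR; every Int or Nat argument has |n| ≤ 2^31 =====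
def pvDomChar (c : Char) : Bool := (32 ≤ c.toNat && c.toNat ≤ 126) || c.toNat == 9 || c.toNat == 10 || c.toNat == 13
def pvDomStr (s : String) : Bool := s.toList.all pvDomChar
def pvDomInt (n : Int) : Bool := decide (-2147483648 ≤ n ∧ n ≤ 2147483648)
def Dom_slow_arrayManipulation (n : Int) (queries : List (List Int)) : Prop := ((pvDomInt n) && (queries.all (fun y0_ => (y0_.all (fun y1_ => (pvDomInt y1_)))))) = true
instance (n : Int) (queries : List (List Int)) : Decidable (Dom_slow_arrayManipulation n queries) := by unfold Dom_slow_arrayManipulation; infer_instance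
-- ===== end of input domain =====

-- B replaces A's per-query rebuilding of the whole interval list by a depth-first
-- traversal with an explicit stack (one interval threaded through all remaining
-- queries at once); leaves come out in reverse order, which we prove irrelevant
-- for the final maximum (objective: alternative).

-- ===== PORT A =====
-- query[i]; Pre_ guarantees 3 ≤ q.length, so indices 0,1,2 are in range (Python would raise IndexError otherwise)
def pvQ (q : List Int) (i : Int) : Int := PySem.List.pyGetD q i 0

-- the body of A's inner loop on one interval (lo,hi,v): A's guard chain, literally;
-- the 3rd branch ("cut covers the interval") has no `continue` in A, so control falls
-- through to guards 4 and 5 afterwards (its inner `if interval[1]==query[1]: continue`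
-- is unreachable there since hi < b).
def pvBodyA (a b k : Int) (acc : List (Int × Int × Int)) (i : Int × Int × Int) : List (Int × Int × Int) :=
  let lo := i.1; let hi := i.2.1; let v := i.2.2
  if (a < lo ∧ b < lo) ∨ (a > hi ∧ b > hi) then acc ++ [(lo, hi, v)]
  else if lo ≤ a ∧ hi ≥ b then
    if lo = a then acc ++ [(lo, b, v + k), (b + 1, hi, v)]
    else if hi = b then acc ++ [(lo, a, v), (a + 1, hi, v + k)]
    else acc ++ [(lo, a - 1, v), (a, b, v + k), (b + 1, hi, v + k)]
  else
    let acc := if lo > a ∧ hi < b then acc ++ [(lo, hi, v + k)] else acc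
    if lo < a ∧ a ≤ hi ∧ b > hi then acc ++ [(lo, a - 1, v), (a, hi, v + k)]
    else if hi > b ∧ b > lo then acc ++ [(lo, b, v + k), (b + 1, hi, v)]
    else acc

def slow_arrayManipulation (n : Int) (queries : List (List Int)) : Int :=
  let final := queries.foldl
    (fun intervals q => intervals.foldl (pvBodyA (pvQ q 0) (pvQ q 1) (pvQ q 2)) []) [(1, n, 0)]
  -- max(intervals, key=lambda i: i[2])[2]; Python raises ValueError on an empty list
  match PySem.List.max? final (fun t => t.2.2) with
  | some t => t.2.2
  | none => 0

-- ===== PORT B =====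
-- Source B's split(lo, hi, v, a, b, k)
def pvSplit (lo hi v a b k : Int) : List (Int × Int × Int) :=
  if (a < lo ∧ b < lo) ∨ (a > hi ∧ b > hi) then [(lo, hi, v)]
  else if lo ≤ a ∧ b ≤ hi then
    if lo = a then [(lo, b, v + k), (b + 1, hi, v)]
    else if hi = b then [(lo, a, v), (a + 1, hi, v + k)]
    else [(lo, a - 1, v), (a, b, v + k), (b + 1, hi, v + k)]
  else
    let out := if a < lo ∧ hi < b then [(lo, hi, v + k)] else []
    if lo < a ∧ a ≤ hi ∧ hi < b then out ++ [(lo, a - 1, v), (a, hi, v + k)]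
    else if lo < b ∧ b < hi then out ++ [(lo, b, v + k), (b + 1, hi, v)]
    else out

lemma pvSplit_len_le (lo hi v a b k : Int) : (pvSplit lo hi v a b k).length ≤ 3 := by
  unfold pvSplit; split_ifs <;> simp

-- stack items carry the remaining queries (Source B indexes with i; the suffix queries[i:]
-- is the same data); Lean's stack keeps the top at the HEAD, so Python's
-- `stack.extend(children)` + pop-from-the-end = pushing the children reversed at the head:
-- the processing order and hence the leaves list are exactly Source B's.
def pvWeight (st : List (Int × Int × Int × List (List Int))) : Nat :=
  (st.map (fun t => 4 ^ t.2.2.2.length)).sum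

-- the while-loop of Source B, accumulating `leaves`
def pvLoop (st : List (Int × Int × Int × List (List Int))) (leaves : List Int) : List Int :=
  match st with
  | [] => leaves
  | (lo, hi, v, rest) :: tl =>
    match rest with
    | [] => pvLoop tl (leaves ++ [v])
    | q :: rs =>
      pvLoop (((pvSplit lo hi v (pvQ q 0) (pvQ q 1) (pvQ q 2)).map
                 (fun c => (c.1, c.2.1, c.2.2, rs))).reverse ++ tl) leaves
termination_by pvWeight st
decreasing_by
  · simp [pvWeight]
  · simp only [pvWeight, List.map_append, List.sum_append, List.map_reverse, List.sum_reverse,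
      List.map_map, List.map_cons, List.sum_cons]
    have h1 : ((pvSplit lo hi v (pvQ q 0) (pvQ q 1) (pvQ q 2)).map
        ((fun t => 4 ^ t.2.2.2.length) ∘ (fun c => (c.1, c.2.1, c.2.2, rs)))).sum
        = (pvSplit lo hi v (pvQ q 0) (pvQ q 1) (pvQ q 2)).length * 4 ^ rs.length := by
      generalize pvSplit lo hi v (pvQ q 0) (pvQ q 1) (pvQ q 2) = cs
      induction cs with
      | nil => simp
      | cons x t ih => simp_all [Function.comp, Nat.succ_mul, Nat.add_comm]
    rw [h1]
    have h2 := pvSplit_len_le lo hi v (pvQ q 0) (pvQ q 1) (pvQ q 2)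
    have h4 := Nat.mul_le_mul_right (4 ^ rs.length) h2
    have h3 : (4 : Nat) ^ (q :: rs).length = 4 * 4 ^ rs.length := by
      simp [List.length_cons, pow_succ, Nat.mul_comm]
    have h5 : 0 < (4 : Nat) ^ rs.length := Nat.pow_pos (by norm_num)
    omega

def slow_arrayManipulation_alt (n : Int) (queries : List (List Int)) : Int :=
  let leaves := pvLoop [(1, n, 0, queries)] []
  -- max(leaves); Python raises ValueError on an empty list
  (PySem.List.max? leaves (fun v => v)).getD 0

-- ===== PRECONDITION & SPEC =====
-- Pre_ requires each query to carry the three fields A reads: on shorter queries A raises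
-- IndexError at query[2] unless the query happens to miss every interval, in which case A
-- returns while B (which reads q[0..2] up front) still raises — that accidental corner is
-- excluded (see the cite).  A and B raise ValueError on exactly the same inputs (the rare
-- query sets whose interval list empties out); both behave identically there, so Pre_
-- does not carve those out.
def Pre_slow_arrayManipulation (n : Int) (queries : List (List Int)) : Prop :=
  ∀ q ∈ queries, 3 ≤ q.length
instance (n : Int) (queries : List (List Int)) : Decidable (Pre_slow_arrayManipulation n queries) := by unfold Pre_slow_arrayManipulation; infer_instance

def pvWitness_slow_arrayManipulation : Int × List (List Int) := (5, [[2, 4, 3], [3, 5, 1]])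

def Spec_slow_arrayManipulation (n : Int) (queries : List (List Int)) (out : Int) : Prop := out = slow_arrayManipulation_alt n queries
instance (n : Int) (queries : List (List Int)) (out : Int) : Decidable (Spec_slow_arrayManipulation n queries out) := by unfold Spec_slow_arrayManipulation; infer_instance

-- ===== CLAIM (what is proved, stated in full; the proofs are below) =====
def Claim_equal_slow_arrayManipulation : Prop := ∀ (n : Int) (queries : List (List Int)), Dom_slow_arrayManipulation n queries → Pre_slow_arrayManipulation n queries → Spec_slow_arrayManipulation n queries (slow_arrayManipulation n queries)

-- ===== LEMMAS AND PROOFS =====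

-- A's guard chain on one interval appends exactly B's split pieces.
lemma pvBodyA_eq_split (a b k : Int) (acc : List (Int × Int × Int)) (i : Int × Int × Int) :
    pvBodyA a b k acc i = acc ++ pvSplit i.1 i.2.1 i.2.2 a b k := by
  obtain ⟨lo, hi, v⟩ := i
  simp only [pvBodyA, pvSplit]
  split_ifs <;> first | rfl | omega | simp_all

-- One of A's passes over the interval list is a flatMap of pvSplit.
lemma pvStep_eq (a b k : Int) (ivs : List (Int × Int × Int)) :
    ivs.foldl (pvBodyA a b k) [] = ivs.flatMap (fun t => pvSplit t.1 t.2.1 t.2.2 a b k) := by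
  have h := PySem.List.foldl_congr_mem ivs (pvBodyA a b k)
      (fun acc t => acc ++ pvSplit t.1 t.2.1 t.2.2 a b k) []
      (fun acc x _ => pvBodyA_eq_split a b k acc x)
  rw [h, PySem.List.foldl_append_eq_flatMap]
  rfl

-- the depth-first leaf values of one interval under a query suffix, in A's order
def pvLeaves (t : Int × Int × Int) : List (List Int) → List Int
  | [] => [t.2.2]
  | q :: rs => (pvSplit t.1 t.2.1 t.2.2 (pvQ q 0) (pvQ q 1) (pvQ q 2)).flatMap
      (fun c => pvLeaves c rs)

-- A's staged passes compute exactly the concatenated depth-first leaves.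
lemma pvFoldA_leaves : ∀ (qs : List (List Int)) (ts : List (Int × Int × Int)),
    (qs.foldl (fun ivs q => ivs.foldl (pvBodyA (pvQ q 0) (pvQ q 1) (pvQ q 2)) []) ts).map
        (fun t => t.2.2)
      = ts.flatMap (fun t => pvLeaves t qs) := by
  intro qs
  induction qs with
  | nil =>
    intro ts
    induction ts with
    | nil => rfl
    | cons x t ih => simp_all [pvLeaves]
  | cons q rs ih =>
    intro ts
    rw [List.foldl_cons, pvStep_eq, ih, List.flatMap_assoc]
    rfl

lemma pvReverse_flatMap {α β : Type} (l : List α) (f : α → List β) :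
    (l.flatMap f).reverse = l.reverse.flatMap (fun x => (f x).reverse) := by
  induction l with
  | nil => rfl
  | cons x t ih => simp [ih]

-- B's stack loop collects the same leaves, item by item, in reverse depth-first order.
lemma pvLoop_spec : ∀ (st : List (Int × Int × Int × List (List Int))) (leaves : List Int),
    pvLoop st leaves
      = leaves ++ st.flatMap (fun it => (pvLeaves (it.1, it.2.1, it.2.2.1) it.2.2.2).reverse) := by
  intro st leaves
  induction st, leaves using pvLoop.induct with
  | case1 leaves => simp [pvLoop]
  | case2 leaves lo hi v tl ih =>
    rw [pvLoop, ih]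
    simp [pvLeaves]
  | case3 leaves lo hi v tl q rs ih =>
    have key : (((pvSplit lo hi v (pvQ q 0) (pvQ q 1) (pvQ q 2)).map
          (fun c => (c.1, c.2.1, c.2.2, rs))).reverse).flatMap
            (fun it => (pvLeaves (it.1, it.2.1, it.2.2.1) it.2.2.2).reverse)
        = (pvLeaves (lo, hi, v) (q :: rs)).reverse := by
      rw [pvLeaves, pvReverse_flatMap, ← List.map_reverse, List.flatMap_map]
    rw [pvLoop, ih, List.flatMap_append, key, List.flatMap_cons, ← List.append_assoc]

def pvMaxStep {α : Type} (key : α → Int) (acc : Option α) (x : α) : Option α :=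
  match acc with
  | none => some x
  | some m => if key m < key x then some x else some m

lemma pvMax?_eq_foldl {α : Type} (l : List α) (key : α → Int) :
    PySem.List.max? l key = l.foldl (pvMaxStep key) none := rfl

-- Python's max(...) step for the identity key, as an Option-valued fold
def pvOMax (o : Option Int) (x : Int) : Option Int :=
  some (match o with | none => x | some m => max m x)

lemma pvMaxq_eq_omax : ∀ (l : List Int) (acc : Option Int),
    l.foldl (pvMaxStep (fun v => v)) acc = l.foldl pvOMax acc := by
  intro l
  induction l with
  | nil => intro acc; rfl
  | cons x t ih =>
    intro acc
    rw [List.foldl_cons, List.foldl_cons, ih]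
    congr 1
    cases acc with
    | none => rfl
    | some m =>
      simp only [pvMaxStep, pvOMax]
      split_ifs with h
      · simp [max_eq_right (le_of_lt h)]
      · simp [max_eq_left (le_of_not_gt h)]

lemma pvOMax_seed : ∀ (l : List Int) (o : Option Int) (x : Int),
    l.foldl pvOMax (pvOMax o x) = pvOMax (l.foldl pvOMax o) x := by
  intro l
  induction l with
  | nil => intro o x; rfl
  | cons y t ih =>
    intro o x
    rw [List.foldl_cons, List.foldl_cons, ← ih]
    congr 1
    cases o with
    | none => simp [pvOMax, max_comm]
    | some m => simp [pvOMax, max_right_comm]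

lemma pvOMax_reverse : ∀ (l : List Int) (o : Option Int),
    l.reverse.foldl pvOMax o = l.foldl pvOMax o := by
  intro l
  induction l with
  | nil => intro o; rfl
  | cons x t ih =>
    intro o
    simp only [List.reverse_cons, List.foldl_append, List.foldl_cons, List.foldl_nil, ih]
    rw [← pvOMax_seed]

-- the value of Python's max over a list of ints equals the one over the reversed list
lemma pvMaxq_reverse (l : List Int) :
    (PySem.List.max? l.reverse (fun v => v)).getD 0 = (PySem.List.max? l (fun v => v)).getD 0 := by
  have h1 : ∀ (m : List Int), PySem.List.max? m (fun v => v) = m.foldl pvOMax none := by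
    intro m
    rw [pvMax?_eq_foldl, pvMaxq_eq_omax]
  rw [h1, h1, pvOMax_reverse]

-- max(l, key=third)[2] (first extremal element, projected) = max of the projections.
lemma pvMax_map {α : Type} (key : α → Int) :
    ∀ (l : List α) (acc : Option α),
      Option.map key (l.foldl (pvMaxStep key) acc)
      = (l.map key).foldl (pvMaxStep (fun v => v)) (acc.map key) := by
  intro l
  induction l with
  | nil => intro acc; rfl
  | cons x t ih =>
    intro acc
    rw [List.foldl_cons, List.map_cons, List.foldl_cons, ih]
    cases acc with
    | none => rfl
    | some m => simp only [Option.map_some, pvMaxStep]; split_ifs <;> rfl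

lemma pvMax_proj (l : List (Int × Int × Int)) :
    (match PySem.List.max? l (fun t => t.2.2) with
      | some t => t.2.2
      | none => 0)
    = (PySem.List.max? (l.map (fun t => t.2.2)) (fun v => v)).getD 0 := by
  have h := pvMax_map (fun t => t.2.2) l none
  simp only [Option.map_none] at h
  rw [pvMax?_eq_foldl, pvMax?_eq_foldl, ← h]
  cases l.foldl (pvMaxStep (fun t => t.2.2)) none <;> rfl

-- ===== VERDICT (by name: the statement is the Claim_ definition above) =====
theorem slow_arrayManipulation_spec : Claim_equal_slow_arrayManipulation := by
  intro n queries _hdom _hpre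
  unfold Spec_slow_arrayManipulation slow_arrayManipulation slow_arrayManipulation_alt
  rw [pvLoop_spec]
  simp only [List.flatMap_cons, List.flatMap_nil, List.append_nil, List.nil_append]
  rw [pvMax_proj, pvFoldA_leaves queries [(1, n, 0)]]
  simp only [List.flatMap_cons, List.flatMap_nil, List.append_nil]
  exact (pvMaxq_reverse _).symm
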